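-- pv_equiv track=rewrite | github.com/rpetit3/vcf-annotator | vcfannotator/genbank.py | determine_iupac_base
-- ===== SOURCE A (Python) =====
-- def determine_iupac_base(bases):
--     """
--     Determine the IUPAC symbol for a list of nucleotides.
--
--     Source: https://en.wikipedia.org/wiki/Nucleic_acid_notation
--     List elements are in this order: [A,C,G,T]
--     """
--     if len(bases) > 1:
--         iupac_notation = {
--             'W': [True, False, False, True],
--             'S': [False, True, True, False],
--             'M': [True, True, False, False],
--             'K': [False, False, True, True],
--             'R': [True, False, True, False],
--             'Y': [False, True, False, True],
--             'B': [False, True, True, True],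
--             'D': [True, False, True, True],
--             'H': [True, True, False, True],
--             'V': [True, True, True, False],
--             'N': [False, False, False, False]
--         }
--
--         base_condition = [base in bases for base in ['A', 'C', 'G', 'T']]
--         for symbol, iupac_condition in iupac_notation.items():
--             if iupac_condition == base_condition:
--                 return symbol
-- ===== SOURCE B (Python) =====
-- _IUPAC_TABLE = ['N', None, None, 'M', None, 'R', 'S', 'V',
--                 None, 'W', 'Y', 'H', 'K', 'D', 'B', None]
--
--
-- def determine_iupac_base(bases):
--     if len(bases) > 1:
--         key = 0
--         for i, b in enumerate('ACGT'):
--             if b in bases: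
--                 key |= 1 << i
--         return _IUPAC_TABLE[key]
-- ===== Notes on version B (the rewrite author's own statement) =====
-- stated objective: idiomatic
-- what changed: Replaced the 11-entry dict of boolean-vector conditions scanned linearly with a 4-bit presence bitmask indexing a precomputed 16-slot table.
import Mathlib
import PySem

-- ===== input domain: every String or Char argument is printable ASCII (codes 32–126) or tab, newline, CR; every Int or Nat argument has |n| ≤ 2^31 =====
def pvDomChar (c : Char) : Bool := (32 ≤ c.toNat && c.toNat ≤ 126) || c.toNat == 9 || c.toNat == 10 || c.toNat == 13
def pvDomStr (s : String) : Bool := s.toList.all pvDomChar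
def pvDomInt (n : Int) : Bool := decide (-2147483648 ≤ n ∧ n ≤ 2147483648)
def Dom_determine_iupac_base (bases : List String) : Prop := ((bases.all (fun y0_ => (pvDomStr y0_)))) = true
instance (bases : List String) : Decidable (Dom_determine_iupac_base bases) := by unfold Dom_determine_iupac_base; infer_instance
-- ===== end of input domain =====

-- B replaces A's linear scan of an 11-entry dict of boolean condition vectors
-- by a 4-bit presence bitmask indexing a precomputed 16-slot table (idiomatic).

-- ===== PORT A =====
def determine_iupac_base (bases : List String) : Option String :=
  if bases.length > 1 then
    let iupac_notation : List (String × List Bool) :=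
      [("W", [true, false, false, true]),
       ("S", [false, true, true, false]),
       ("M", [true, true, false, false]),
       ("K", [false, false, true, true]),
       ("R", [true, false, true, false]),
       ("Y", [false, true, false, true]),
       ("B", [false, true, true, true]),
       ("D", [true, false, true, true]),
       ("H", [true, true, false, true]),
       ("V", [true, true, true, false]),
       ("N", [false, false, false, false])]
    let base_condition := (["A", "C", "G", "T"]).map (fun base => bases.contains base)
    (iupac_notation.find? (fun p => p.2 == base_condition)).map Prod.fst
  else
    none

-- ===== PORT B =====
def pvIupacTable : List (Option String) :=
  [some "N", none, none, some "M", none, some "R", some "S", some "V",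
   none, some "W", some "Y", some "H", some "K", some "D", some "B", none]

def determine_iupac_base_alt (bases : List String) : Option String :=
  if bases.length > 1 then
    -- key = bitmask built by the enumerate loop of Source B
    let key : Nat :=
      ([(0, "A"), (1, "C"), (2, "G"), (3, "T")] : List (Nat × String)).foldl
        (fun k p => if bases.contains p.2 then k ||| (1 <<< p.1) else k) 0
    ((PySem.List.pyGet? pvIupacTable (Int.ofNat key)).join)
  else
    none

-- ===== PRECONDITION & SPEC =====
def Spec_determine_iupac_base (bases : List String) (out : Option String) : Prop := out = determine_iupac_base_alt bases
instance (bases : List String) (out : Option String) : Decidable (Spec_determine_iupac_base bases out) := by unfold Spec_determine_iupac_base; infer_instance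

-- ===== CLAIM (what is proved, stated in full; the proofs are below) =====
def Claim_equal_determine_iupac_base : Prop := ∀ (bases : List String), Dom_determine_iupac_base bases → Spec_determine_iupac_base bases (determine_iupac_base bases)

-- ===== LEMMAS AND PROOFS =====

-- ===== VERDICT (by name: the statement is the Claim_ definition above) =====
theorem determine_iupac_base_spec : Claim_equal_determine_iupac_base := by
  intro bases _
  unfold Spec_determine_iupac_base determine_iupac_base determine_iupac_base_alt
  by_cases h : bases.length > 1
  · simp only [if_pos h]
    cases hA : decide ("A" ∈ bases) <;> cases hC : decide ("C" ∈ bases) <;>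
      cases hG : decide ("G" ∈ bases) <;> cases hT : decide ("T" ∈ bases) <;>
      (simp only [List.map, List.foldl, List.contains_eq_mem, hA, hC, hG, hT]; rfl)
  · simp only [if_neg h]
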